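-- pv_equiv track=rewrite | github.com/CaioXTSY/flask-boilerplate | setup/file_utils.py | remove_lines_containing
-- ===== SOURCE A (Python) =====
-- def remove_lines_containing(content: str, substrings: list[str]) -> str:
--     """Remove all lines that contain any of the given substrings.
--     Collapses multiple consecutive blank lines into one."""
--     lines = content.splitlines(keepends=True)
--     filtered = [l for l in lines if not any(s in l for s in substrings)]
--     out: list[str] = []
--     prev_blank = False
--     for line in filtered:
--         is_blank = line.strip() == ""
--         if is_blank and prev_blank:
--             continue
--         out.append(line)
--         prev_blank = is_blank
--     return "".join(out)
-- ===== SOURCE B (Python) =====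
-- def remove_lines_containing(content: str, substrings: list[str]) -> str:
--     """One fused index scan over the raw string: each line is cut out in place
--     (no splitlines), dropped lines and repeated blanks are skipped as we go,
--     and 'previous kept line was blank' is read off the output itself."""
--     out: list[str] = []
--     i = 0
--     n = len(content)
--     while i < n:
--         j = i
--         while j < n and content[j] != "\n" and content[j] != "\r":
--             j += 1
--         if j < n:
--             j += 2 if content[j] == "\r" and j + 1 < n and content[j + 1] == "\n" else 1
--         line = content[i:j]
--         i = j
--         if any(s in line for s in substrings):
--             continue
--         if line.strip() == "" and out and out[-1].strip() == "":
--             continue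
--         out.append(line)
--     return "".join(out)
-- ===== Notes on version B (the rewrite author's own statement) =====
-- stated objective: alternative
-- what changed: B replaces A's two-phase pipeline (splitlines into a list, filter comprehension, then a collapse loop with a prev_blank flag) by a single fused index scan over the raw string that cuts each line out in place and decides drop/collapse immediately, reading 'previous kept line was blank' off the output list itself instead of a flag.
import Mathlib
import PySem

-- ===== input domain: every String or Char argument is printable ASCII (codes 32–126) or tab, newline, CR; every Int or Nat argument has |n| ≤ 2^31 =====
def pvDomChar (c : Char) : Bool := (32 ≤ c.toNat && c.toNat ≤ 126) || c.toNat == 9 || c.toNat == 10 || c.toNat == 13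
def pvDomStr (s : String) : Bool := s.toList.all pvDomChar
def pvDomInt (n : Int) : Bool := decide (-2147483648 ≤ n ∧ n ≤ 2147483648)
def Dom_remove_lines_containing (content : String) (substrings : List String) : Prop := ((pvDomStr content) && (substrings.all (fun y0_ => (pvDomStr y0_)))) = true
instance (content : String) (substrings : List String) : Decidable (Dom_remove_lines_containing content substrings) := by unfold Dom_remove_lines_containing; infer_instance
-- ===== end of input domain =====

-- B fuses A's three phases (splitlines / filter / collapse-with-flag) into one in-place
-- line scan that reads "previous kept line was blank" off the output itself; objective:
-- alternative (same cost, different structure).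

-- ===== PORT A =====
-- content.splitlines(keepends=True), ported by hand over List Char with an accumulator for
-- the current line; exact on Dom, where the only line-break characters are '\n', '\r', "\r\n".
def skAux : List Char → List Char → List (List Char)
  | [], acc => if acc.isEmpty then [] else [acc.reverse]
  | c :: rest, acc =>
    if c = '\n' then (acc.reverse ++ [c]) :: skAux rest []
    else if c = '\r' then
      if rest.head? = some '\n' then (acc.reverse ++ [c, '\n']) :: skAux rest.tail []
      else (acc.reverse ++ [c]) :: skAux rest []
    else skAux rest (c :: acc)
termination_by cs _ => cs.length
decreasing_by
  all_goals simp

def remove_lines_containing (content : String) (substrings : List String) : String :=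
  let lines := skAux content.toList []
  let filtered := lines.filter (fun l => !(substrings.any (fun s => PySem.Chars.isIn s.toList l)))
  let res := filtered.foldl
    (fun (st : List (List Char) × Bool) line =>
      let isBlank := (PySem.Chars.strip line).isEmpty
      if isBlank && st.2 then st else (st.1 ++ [line], isBlank))
    ([], false)
  String.mk (PySem.Chars.join [] res.1)

-- ===== PORT B =====
-- the inner while of Source B: cut the next line (with its line ending) off the front; exact on Dom.
def takeLine : List Char → List Char × List Char
  | [] => ([], [])
  | c :: rest =>
    if c = '\n' then ([c], rest)
    else if c = '\r' then
      if rest.head? = some '\n' then ([c, '\n'], rest.tail)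
      else ([c], rest)
    else
      let p := takeLine rest
      (c :: p.1, p.2)

-- the body of Source B's while loop: drop the line, collapse it, or append it to out
def lineStep (substrings : List String) (out : List (List Char)) (line : List Char) : List (List Char) :=
  if substrings.any (fun s => PySem.Chars.isIn s.toList line) then out
  else if (PySem.Chars.strip line).isEmpty && !out.isEmpty
          && (PySem.Chars.strip (out.getLastD [])).isEmpty then out
  else out ++ [line]

theorem takeLine_snd_le (cs : List Char) : (takeLine cs).2.length ≤ cs.length := by
  induction cs with
  | nil => simp [takeLine]
  | cons c rest ih =>
    simp only [takeLine]
    split_ifs <;> simp_all <;> omega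

theorem takeLine_snd_lt (c : Char) (rest : List Char) :
    (takeLine (c :: rest)).2.length < (c :: rest).length := by
  have h := takeLine_snd_le rest
  simp only [takeLine]
  split_ifs <;> simp_all <;> omega

def bLoop (substrings : List String) : List Char → List (List Char) → List (List Char)
  | [], out => out
  | c :: rest, out =>
    let p := takeLine (c :: rest)
    bLoop substrings p.2 (lineStep substrings out p.1)
termination_by cs _ => cs.length
decreasing_by exact takeLine_snd_lt c rest

def remove_lines_containing_alt (content : String) (substrings : List String) : String :=
  String.mk (PySem.Chars.join [] (bLoop substrings content.toList []))

-- ===== PRECONDITION & SPEC =====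
def Spec_remove_lines_containing (content : String) (substrings : List String) (out : String) : Prop := out = remove_lines_containing_alt content substrings
instance (content : String) (substrings : List String) (out : String) : Decidable (Spec_remove_lines_containing content substrings out) := by unfold Spec_remove_lines_containing; infer_instance

-- ===== CLAIM (what is proved, stated in full; the proofs are below) =====
def Claim_equal_remove_lines_containing : Prop := ∀ (content : String) (substrings : List String), Dom_remove_lines_containing content substrings → Spec_remove_lines_containing content substrings (remove_lines_containing content substrings)

-- ===== LEMMAS AND PROOFS =====

-- A's collapse-loop body, named for the proofs
def aStep (st : List (List Char) × Bool) (line : List Char) : List (List Char) × Bool :=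
  let isBlank := (PySem.Chars.strip line).isEmpty
  if isBlank && st.2 then st else (st.1 ++ [line], isBlank)

theorem skAux_cons (cs acc : List Char) (h : ¬(cs = [] ∧ acc = [])) :
    skAux cs acc = (acc.reverse ++ (takeLine cs).1) :: skAux (takeLine cs).2 [] := by
  induction cs generalizing acc with
  | nil =>
    have hacc : acc ≠ [] := fun ha => h ⟨rfl, ha⟩
    simp [skAux, takeLine, hacc]
  | cons c rest ih =>
    by_cases h1 : c = '\n'
    · simp [skAux, takeLine, h1]
    by_cases h2 : c = '\r'
    · by_cases h3 : rest.head? = some '\n' <;> simp [skAux, takeLine, h2, h3]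
    · simp only [skAux, takeLine, h1, h2]
      rw [ih (c :: acc) (by simp)]
      simp

theorem bLoop_eq_foldl (subs : List String) :
    ∀ (n : Nat) (cs : List Char), cs.length ≤ n → ∀ out,
      bLoop subs cs out = (skAux cs []).foldl (lineStep subs) out := by
  intro n
  induction n with
  | zero =>
    intro cs hl out
    have : cs = [] := by cases cs <;> simp_all
    subst this
    simp [bLoop, skAux]
  | succ n ih =>
    intro cs hl out
    cases cs with
    | nil => simp [bLoop, skAux]
    | cons c rest =>
      rw [skAux_cons (c :: rest) [] (by simp)]
      simp only [List.reverse_nil, List.nil_append, List.foldl_cons]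
      rw [show bLoop subs (c :: rest) out
            = bLoop subs (takeLine (c :: rest)).2 (lineStep subs out (takeLine (c :: rest)).1)
          from by rw [bLoop]]
      exact ih _ (by have := takeLine_snd_lt c rest; simp at hl this ⊢; omega) _

theorem foldl_fused (subs : List String) :
    ∀ (ls : List (List Char)) (out : List (List Char)) (pb : Bool),
      pb = (!out.isEmpty && (PySem.Chars.strip (out.getLastD [])).isEmpty) →
      ((ls.filter (fun l => !(subs.any (fun s => PySem.Chars.isIn s.toList l)))).foldl
          aStep (out, pb)).1
        = ls.foldl (lineStep subs) out := by
  intro ls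
  induction ls with
  | nil => intro out pb _; simp
  | cons l ls ih =>
    intro out pb hpb
    by_cases hk : (subs.any (fun s => PySem.Chars.isIn s.toList l)) = true
    · -- line dropped: filter skips it, lineStep returns out unchanged
      rw [List.foldl_cons, show lineStep subs out l = out from by simp [lineStep, hk]]
      rw [List.filter_cons_of_neg (by simp [hk])]
      exact ih out pb hpb
    · -- line kept
      rw [List.filter_cons_of_pos (by simp [hk]), List.foldl_cons, List.foldl_cons]
      by_cases hb : ((PySem.Chars.strip l).isEmpty && pb) = true
      · have h1 : (PySem.Chars.strip l).isEmpty = true ∧ pb = true := by simpa using hb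
        have h2 : (!out.isEmpty) = true ∧ (PySem.Chars.strip (out.getLastD [])).isEmpty = true := by
          simpa [hpb] using h1.2
        have hstep : aStep (out, pb) l = (out, pb) := by simp [aStep, hb]
        have hline : lineStep subs out l = out := by
          simp only [lineStep]
          rw [if_neg hk, if_pos (by simp_all)]
        rw [hstep, hline]
        exact ih out pb hpb
      · have hcond : ((PySem.Chars.strip l).isEmpty && !out.isEmpty
            && (PySem.Chars.strip (out.getLastD [])).isEmpty) = false := by
          rw [Bool.and_assoc, ← hpb]
          simpa using hb
        have hstep : aStep (out, pb) l = (out ++ [l], (PySem.Chars.strip l).isEmpty) := by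
          simp only [aStep]
          rw [if_neg hb]
        have hline : lineStep subs out l = out ++ [l] := by
          simp only [lineStep]
          rw [if_neg hk, if_neg (by simp_all)]
        rw [hstep, hline]
        exact ih (out ++ [l]) _ (by simp)

-- ===== VERDICT (by name: the statement is the Claim_ definition above) =====
theorem remove_lines_containing_spec : Claim_equal_remove_lines_containing := by
  intro content substrings _
  unfold Spec_remove_lines_containing remove_lines_containing remove_lines_containing_alt
  rw [bLoop_eq_foldl substrings content.toList.length content.toList le_rfl []]
  rw [← foldl_fused substrings (skAux content.toList []) [] false (by simp)]
  rfl
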